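-- pv_equiv track=rewrite | github.com/ly2xxx/net-test | app.py | detect_theme_from_url
-- ===== SOURCE A (Python) =====
-- def detect_theme_from_url(url: str) -> str:
--     """
--     Auto-detect appropriate QR-Greeting theme based on URL domain.
--
--     Args:
--         url: The source URL
--
--     Returns:
--         Theme name string
--     """
--     url_lower = url.lower()
--
--     if any(d in url_lower for d in ['youtube', 'vimeo', 'tiktok', 'video']):
--         return "fireworks"
--     elif any(d in url_lower for d in ['news', 'bbc', 'cnn', 'nytimes']):
--         return "lights"
--     elif any(d in url_lower for d in ['amazon', 'ebay', 'shop', 'etsy']):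
--         return "confetti"
--     elif any(d in url_lower for d in ['github', 'gitlab', 'stackoverflow']):
--         return "stars"
--     elif any(d in url_lower for d in ['linkedin', 'twitter', 'facebook']):
--         return "champagne"
--     else:
--         return "lights"
-- ===== SOURCE B (Python) =====
-- # Flat keyword list with numeric priorities; scan all keywords once,
-- # keeping the best (lowest-priority) matching theme, instead of an
-- # ordered short-circuiting group chain.
-- _KEYWORDS = [
--     ("youtube", 0, "fireworks"), ("vimeo", 0, "fireworks"),
--     ("tiktok", 0, "fireworks"), ("video", 0, "fireworks"),
--     ("news", 1, "lights"), ("bbc", 1, "lights"),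
--     ("cnn", 1, "lights"), ("nytimes", 1, "lights"),
--     ("amazon", 2, "confetti"), ("ebay", 2, "confetti"),
--     ("shop", 2, "confetti"), ("etsy", 2, "confetti"),
--     ("github", 3, "stars"), ("gitlab", 3, "stars"),
--     ("stackoverflow", 3, "stars"),
--     ("linkedin", 4, "champagne"), ("twitter", 4, "champagne"),
--     ("facebook", 4, "champagne"),
-- ]
--
--
-- def detect_theme_from_url(url: str) -> str:
--     url_lower = url.lower()
--     best = None  # (priority, theme) of the best match found so far
--     for kw, prio, theme in _KEYWORDS:
--         if kw in url_lower and (best is None or prio < best[0]):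
--             best = (prio, theme)
--     return best[1] if best is not None else "lights"
-- ===== Notes on version B (the rewrite author's own statement) =====
-- stated objective: alternative
-- what changed: Replaced the short-circuiting if/elif group chain with a flat keyword->(priority, theme) list scanned in full once, keeping the minimum-priority match in an accumulator and falling back to the default theme when nothing matched.
import Mathlib
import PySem

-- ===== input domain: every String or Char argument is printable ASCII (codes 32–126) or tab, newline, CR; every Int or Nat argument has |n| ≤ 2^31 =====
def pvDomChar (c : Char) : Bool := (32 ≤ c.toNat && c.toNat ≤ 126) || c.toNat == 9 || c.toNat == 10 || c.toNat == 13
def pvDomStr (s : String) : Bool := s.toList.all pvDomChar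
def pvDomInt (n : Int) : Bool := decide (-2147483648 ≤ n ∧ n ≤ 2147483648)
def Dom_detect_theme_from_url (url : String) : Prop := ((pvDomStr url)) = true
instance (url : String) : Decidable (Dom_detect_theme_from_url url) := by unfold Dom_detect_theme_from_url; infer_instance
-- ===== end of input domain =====

-- B replaces A's short-circuiting if/elif group chain with one full scan over a flat
-- keyword/priority list keeping the minimum-priority match (alternative decomposition).


-- ===== PORT A =====
def detect_theme_from_url (url : String) : String :=
  let url_lower := PySem.Str.lower url
  if ["youtube", "vimeo", "tiktok", "video"].any (fun d => PySem.Str.isIn d url_lower) then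
    "fireworks"
  else if ["news", "bbc", "cnn", "nytimes"].any (fun d => PySem.Str.isIn d url_lower) then
    "lights"
  else if ["amazon", "ebay", "shop", "etsy"].any (fun d => PySem.Str.isIn d url_lower) then
    "confetti"
  else if ["github", "gitlab", "stackoverflow"].any (fun d => PySem.Str.isIn d url_lower) then
    "stars"
  else if ["linkedin", "twitter", "facebook"].any (fun d => PySem.Str.isIn d url_lower) then
    "champagne"
  else
    "lights"

-- ===== PORT B =====
def kwTable : List (String × Int × String) :=
  [ ("youtube", 0, "fireworks"), ("vimeo", 0, "fireworks"),
    ("tiktok", 0, "fireworks"), ("video", 0, "fireworks"),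
    ("news", 1, "lights"), ("bbc", 1, "lights"),
    ("cnn", 1, "lights"), ("nytimes", 1, "lights"),
    ("amazon", 2, "confetti"), ("ebay", 2, "confetti"),
    ("shop", 2, "confetti"), ("etsy", 2, "confetti"),
    ("github", 3, "stars"), ("gitlab", 3, "stars"),
    ("stackoverflow", 3, "stars"),
    ("linkedin", 4, "champagne"), ("twitter", 4, "champagne"),
    ("facebook", 4, "champagne") ]

def detect_theme_from_url_alt (url : String) : String :=
  let url_lower := PySem.Str.lower url
  let best : Option (Int × String) :=
    kwTable.foldl
      (fun best e =>
        match best with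
        | none => if PySem.Str.isIn e.1 url_lower then some (e.2.1, e.2.2) else none
        | some b =>
            if PySem.Str.isIn e.1 url_lower && decide (e.2.1 < b.1) then some (e.2.1, e.2.2)
            else some b)
      none
  match best with
  | some b => b.2
  | none => "lights"

-- ===== PRECONDITION & SPEC =====
def Spec_detect_theme_from_url (url : String) (out : String) : Prop := out = detect_theme_from_url_alt url
instance (url : String) (out : String) : Decidable (Spec_detect_theme_from_url url out) := by unfold Spec_detect_theme_from_url; infer_instance

-- ===== CLAIM (what is proved, stated in full; the proofs are below) =====
def Claim_equal_detect_theme_from_url : Prop := ∀ (url : String), Dom_detect_theme_from_url url → Spec_detect_theme_from_url url (detect_theme_from_url url)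

-- ===== LEMMAS AND PROOFS =====

-- ===== VERDICT (by name: the statement is the Claim_ definition above) =====
theorem detect_theme_from_url_spec : Claim_equal_detect_theme_from_url := by
  intro url _
  unfold Spec_detect_theme_from_url detect_theme_from_url detect_theme_from_url_alt kwTable
  simp only [List.foldl, List.any_cons, List.any_nil, Bool.or_false]
  cases h1 : PySem.Str.isIn "youtube" (PySem.Str.lower url)
  case true => simp
  cases h2 : PySem.Str.isIn "vimeo" (PySem.Str.lower url)
  case true => simp
  cases h3 : PySem.Str.isIn "tiktok" (PySem.Str.lower url)
  case true => simp
  cases h4 : PySem.Str.isIn "video" (PySem.Str.lower url)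
  case true => simp
  cases h5 : PySem.Str.isIn "news" (PySem.Str.lower url)
  case true => simp
  cases h6 : PySem.Str.isIn "bbc" (PySem.Str.lower url)
  case true => simp
  cases h7 : PySem.Str.isIn "cnn" (PySem.Str.lower url)
  case true => simp
  cases h8 : PySem.Str.isIn "nytimes" (PySem.Str.lower url)
  case true => simp
  cases h9 : PySem.Str.isIn "amazon" (PySem.Str.lower url)
  case true => simp
  cases h10 : PySem.Str.isIn "ebay" (PySem.Str.lower url)
  case true => simp
  cases h11 : PySem.Str.isIn "shop" (PySem.Str.lower url)
  case true => simp
  cases h12 : PySem.Str.isIn "etsy" (PySem.Str.lower url)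
  case true => simp
  cases h13 : PySem.Str.isIn "github" (PySem.Str.lower url)
  case true => simp
  cases h14 : PySem.Str.isIn "gitlab" (PySem.Str.lower url)
  case true => simp
  cases h15 : PySem.Str.isIn "stackoverflow" (PySem.Str.lower url)
  case true => simp
  cases h16 : PySem.Str.isIn "linkedin" (PySem.Str.lower url)
  case true => simp
  cases h17 : PySem.Str.isIn "twitter" (PySem.Str.lower url)
  case true => simp
  cases h18 : PySem.Str.isIn "facebook" (PySem.Str.lower url)
  case true => simp
  simp
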